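-- pv_equiv track=rewrite | github.com/PermutaTriangle/PermStruct | scratch/test_sortable.py | stack_sort
-- ===== SOURCE A (Python) =====
-- def loc_max(w):
--     '''
--     Helper function for stack-sort and bubble-sort. Returns the index of the
--     maximal element in w. It is assumed that w is non-empty.
--     '''
--
--     m = w[0]
--     i = 0
--     c = 0
--
--     for j in w[1:]:
--         c = c+1
--         if j > m:
--             m = j
--             i = c
--     return i, m
--
-- def stack_sort(w):
--     '''
--     Function takes a permutation w and does one pass of stack-sort on it
--     '''
--
--     i = len(w)
--
--     if i <= 1:
--         return list(w)
--
--     j,J = loc_max(w)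
--
--     if j == 0:
--         W2 = stack_sort(w[1:i])
--         W2.append(J)
--
--         return W2
--
--     if j == i-1:
--         W1 = stack_sort(w[0:i-1])
--         W1.append(J)
--
--         return W1
--
--     W1 = stack_sort(w[0:j])
--     W2 = stack_sort(w[j+1:i])
--
--     W1.extend(W2)
--     W1.extend([J])
--
--     return W1
-- ===== SOURCE B (Python) =====
-- def stack_sort(w):
--     # Single pass with an explicit stack: pop smaller elements before pushing.
--     out = []
--     st = []
--     for x in w:
--         while st and st[-1] < x:
--             out.append(st.pop())
--         st.append(x)
--     while st:
--         out.append(st.pop())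
--     return out
-- ===== Notes on version B (the rewrite author's own statement) =====
-- stated objective: faster
-- what changed: Replaced A's recursive split-at-maximum (loc_max scan plus slicing and recursion on both sides) by the classic single left-to-right pass with an explicit stack that pops smaller elements before each push.
import Mathlib
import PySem

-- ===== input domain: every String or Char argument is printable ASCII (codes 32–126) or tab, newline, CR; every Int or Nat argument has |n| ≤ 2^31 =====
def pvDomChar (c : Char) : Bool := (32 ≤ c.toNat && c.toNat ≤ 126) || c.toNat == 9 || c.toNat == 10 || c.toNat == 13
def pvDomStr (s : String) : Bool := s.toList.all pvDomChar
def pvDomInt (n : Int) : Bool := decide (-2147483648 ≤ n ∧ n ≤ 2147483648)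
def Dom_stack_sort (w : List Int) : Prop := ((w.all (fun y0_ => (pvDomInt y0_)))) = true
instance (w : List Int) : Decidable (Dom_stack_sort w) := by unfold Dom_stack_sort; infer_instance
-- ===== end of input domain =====

-- B replaces A's recursive max-splitting (O(n^2)) by the classic single-pass stack-sort with an
-- explicit stack (O(n)); equivalence of the two is proved for all inputs.

-- ===== PORT A =====
-- step of the 'for j in w[1:]' loop of loc_max; state (m, i, c)
def locMaxStep (acc : Int × Int × Int) (j : Int) : Int × Int × Int :=
  let c := acc.2.2 + 1
  if j > acc.1 then (j, c, c) else (acc.1, acc.2.1, c)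

-- loc_max: index and value of the first maximal element (A assumes w nonempty; [] is unreachable)
def loc_max (w : List Int) : Int × Int :=
  match w with
  | [] => (0, 0)
  | m0 :: rest =>
    let s := rest.foldl locMaxStep (m0, 0, 0)
    (s.2.1, s.1)

-- fold invariant used only for the termination proof of stack_sort
lemma locMax_fold_inv : ∀ (l : List Int) (m i c : Int), 0 ≤ i → i ≤ c →
    0 ≤ (l.foldl locMaxStep (m, i, c)).2.1 ∧
    (l.foldl locMaxStep (m, i, c)).2.1 ≤ (l.foldl locMaxStep (m, i, c)).2.2 ∧
    (l.foldl locMaxStep (m, i, c)).2.2 = c + l.length := by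
  intro l
  induction l with
  | nil => intro m i c h0 h1; simpa using ⟨h0, h1⟩
  | cons j l ih =>
    intro m i c h0 h1
    simp only [List.foldl_cons, locMaxStep]
    split
    · have := ih j (c + 1) (c + 1) (by omega) (by omega)
      refine ⟨this.1, this.2.1, ?_⟩
      rw [this.2.2]; simp; omega
    · have := ih m i (c + 1) h0 (by omega)
      refine ⟨this.1, this.2.1, ?_⟩
      rw [this.2.2]; simp; omega

lemma loc_max_bounds (a : Int) (w : List Int) :
    0 ≤ (loc_max (a :: w)).1 ∧ (loc_max (a :: w)).1 < ((a :: w).length : Int) := by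
  have h := locMax_fold_inv w a 0 0 le_rfl le_rfl
  simp only [loc_max]
  constructor
  · exact h.1
  · have := h.2.1; rw [h.2.2] at this; simp; omega

def stack_sort (w : List Int) : List Int :=
  -- i, j, J of the Python are inlined (pure values); slices are PySem slices
  if ((w.length : Int)) ≤ 1 then w
  else if (loc_max w).1 = 0 then
    stack_sort (PySem.List.slice w (some 1) (some (w.length : Int))) ++ [(loc_max w).2]
  else if (loc_max w).1 = (w.length : Int) - 1 then
    stack_sort (PySem.List.slice w (some 0) (some ((w.length : Int) - 1))) ++ [(loc_max w).2]
  else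
    (stack_sort (PySem.List.slice w (some 0) (some (loc_max w).1)) ++
      stack_sort (PySem.List.slice w (some ((loc_max w).1 + 1)) (some (w.length : Int)))) ++
      [(loc_max w).2]
termination_by w.length
decreasing_by
  · rw [PySem.List.slice_toNat _ (by omega) (by omega)]
    simp; omega
  · rw [PySem.List.slice_toNat _ (by omega) (by omega)]
    simp; omega
  · rcases w with _ | ⟨a, w'⟩
    · simp at *
    · have hb := loc_max_bounds a w'
      rw [PySem.List.slice_toNat _ (by omega) (by omega)]
      simp at *; omega
  · rcases w with _ | ⟨a, w'⟩
    · simp at *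
    · have hb := loc_max_bounds a w'
      rw [PySem.List.slice_toNat _ (by omega) (by omega)]
      simp at *; omega

-- ===== PORT B =====
-- the stack is kept top-first (Python's st[-1]/append/pop are head operations here;
-- the final pop-everything loop 'while st: out.append(st.pop())' is thus 'out ++ st')
def popWhile (st out : List Int) (x : Int) : List Int × List Int :=
  match st with
  | [] => ([], out)
  | t :: s => if t < x then popWhile s (out ++ [t]) x else (t :: s, out)

def ssLoop (st out : List Int) : List Int → List Int × List Int
  | [] => (st, out)
  | x :: rest =>
    let p := popWhile st out x
    ssLoop (x :: p.1) p.2 rest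

def stack_sort_alt (w : List Int) : List Int :=
  let p := ssLoop [] [] w
  p.2 ++ p.1

-- ===== PRECONDITION & SPEC =====
def Spec_stack_sort (w : List Int) (out : List Int) : Prop := out = stack_sort_alt w
instance (w : List Int) (out : List Int) : Decidable (Spec_stack_sort w out) := by unfold Spec_stack_sort; infer_instance

-- ===== CLAIM (what is proved, stated in full; the proofs are below) =====
def Claim_equal_stack_sort : Prop := ∀ (w : List Int), Dom_stack_sort w → Spec_stack_sort w (stack_sort w)

-- ===== LEMMAS AND PROOFS =====

-- A-side: the loc_max fold on a list whose elements are all ≤ the running maximum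
lemma fold_all_le : ∀ (l : List Int) (m i c : Int), (∀ x ∈ l, x ≤ m) →
    l.foldl locMaxStep (m, i, c) = (m, i, c + l.length) := by
  intro l
  induction l with
  | nil => intro m i c _; simp
  | cons j l ih =>
    intro m i c h
    simp only [List.foldl_cons, locMaxStep]
    rw [if_neg (by have := h j (by simp); omega)]
    rw [ih m i (c + 1) (fun x hx => h x (by simp [hx]))]
    simp; omega

-- A-side: the loc_max fold on a list of elements all < M keeps the maximum < M
lemma fold_all_lt : ∀ (l : List Int) (m i c M : Int), m < M → (∀ x ∈ l, x < M) →
    ∃ m' i', l.foldl locMaxStep (m, i, c) = (m', i', c + l.length) ∧ m' < M := by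
  intro l
  induction l with
  | nil => intro m i c M hm _; exact ⟨m, i, by simp, hm⟩
  | cons j l ih =>
    intro m i c M hm h
    simp only [List.foldl_cons, locMaxStep]
    split
    · obtain ⟨m', i', heq, hlt⟩ := ih j (c+1) (c+1) M (h j (by simp)) (fun x hx => h x (by simp [hx]))
      exact ⟨m', i', by rw [heq]; simp; omega, hlt⟩
    · obtain ⟨m', i', heq, hlt⟩ := ih m i (c+1) M hm (fun x hx => h x (by simp [hx]))
      exact ⟨m', i', by rw [heq]; simp; omega, hlt⟩

-- loc_max finds the first maximum
lemma loc_max_spec (u : List Int) (M : Int) (v : List Int)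
    (hu : ∀ x ∈ u, x < M) (hv : ∀ x ∈ v, x ≤ M) :
    loc_max (u ++ M :: v) = ((u.length : Int), M) := by
  cases u with
  | nil =>
    simp only [List.nil_append, loc_max]
    rw [fold_all_le v M 0 0 hv]
    simp
  | cons a u' =>
    simp only [List.cons_append, loc_max, List.foldl_append]
    obtain ⟨m', i', heq, hlt⟩ := fold_all_lt u' a 0 0 M (hu a (by simp))
      (fun x hx => hu x (by simp [hx]))
    rw [heq]
    simp only [List.foldl_cons, locMaxStep]
    rw [if_pos (by omega)]
    rw [fold_all_le v M _ _ hv]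
    simp

lemma stack_sort_nil : stack_sort [] = [] := by rw [stack_sort]; simp

-- how A reduces at the first maximum
lemma stack_sort_split (u : List Int) (M : Int) (v : List Int)
    (hu : ∀ x ∈ u, x < M) (hv : ∀ x ∈ v, x ≤ M) :
    stack_sort (u ++ M :: v) = stack_sort u ++ stack_sort v ++ [M] := by
  rcases Nat.lt_or_ge ((u ++ M :: v).length) 2 with hlen | hlen
  · -- length 1: u = v = []
    have hu0 : u = [] := by cases u <;> simp_all
    subst hu0
    have hv0 : v = [] := by cases v <;> simp_all
    subst hv0
    rw [stack_sort, stack_sort_nil]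
    simp
  · have hloc := loc_max_spec u M v hu hv
    rw [stack_sort, if_neg (by simp at hlen ⊢; omega), hloc]
    simp only
    by_cases hu0 : u = []
    · subst hu0
      rw [if_pos (by simp)]
      rw [PySem.List.slice_toNat _ (by omega) (by omega)]
      simp only [List.nil_append] at hlen ⊢
      have : ((((M :: v).length : Int)).toNat - (1:Int).toNat) = v.length := by simp
      rw [stack_sort_nil]
      simp [List.take_of_length_le]
    · by_cases hv0 : v = []
      · subst hv0
        rw [if_neg (by simpa using hu0), if_pos (by simp)]
        rw [PySem.List.slice_toNat _ (by omega) (by omega)]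
        have h1 : (((u ++ [M]).length : Int) - 1).toNat = u.length := by simp
        rw [h1]
        simp only [Int.toNat_zero, List.drop_zero, Nat.sub_zero]
        rw [List.take_left]
        rw [stack_sort_nil]
        simp
      · have hul : 0 < u.length := List.length_pos_of_ne_nil hu0
        have hvl : 0 < v.length := List.length_pos_of_ne_nil hv0
        rw [if_neg (by simp; omega), if_neg (by simp; omega)]
        rw [PySem.List.slice_toNat _ (by omega) (by omega),
            PySem.List.slice_toNat _ (by omega) (by omega)]
        have h1 : ((u.length : Int)).toNat = u.length := by simp
        have h2 : ((u.length : Int) + 1).toNat = u.length + 1 := by omega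
        rw [h1, h2]
        simp only [Int.toNat_zero, List.drop_zero, Nat.sub_zero]
        have htake : (u ++ M :: v).take u.length = u := List.take_left ..
        have hdrop : (u ++ M :: v).drop (u.length + 1) = v := by
          have : u ++ M :: v = (u ++ [M]) ++ v := by simp
          rw [this]
          have : u.length + 1 = (u ++ [M]).length := by simp
          rw [this, List.drop_left]
        rw [htake, hdrop]
        have htk : v.take ((((u ++ M :: v).length : Int)).toNat - (u.length + 1)) = v := by
          apply List.take_of_length_le; simp; omega
        rw [htk]

-- B-side: appended output factors out of popWhile
lemma popWhile_out : ∀ (st out : List Int) (x : Int),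
    popWhile st out x = ((popWhile st [] x).1, out ++ (popWhile st [] x).2) := by
  intro st
  induction st with
  | nil => intro out x; simp [popWhile]
  | cons t s ih =>
    intro out x
    simp only [popWhile, List.nil_append]
    split
    · rw [ih (out ++ [t]) x, ih [t] x]; simp
    · simp

-- B-side: appended output factors out of ssLoop
lemma ssLoop_out : ∀ (l st out : List Int),
    ssLoop st out l = ((ssLoop st [] l).1, out ++ (ssLoop st [] l).2) := by
  intro l
  induction l with
  | nil => intro st out; simp [ssLoop]
  | cons x rest ih =>
    intro st out
    simp only [ssLoop]
    rw [popWhile_out st out x]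
    conv_rhs => rw [ih]
    conv_lhs => rw [ih]
    rw [popWhile_out st [] x]
    simp

-- B-side: a stack of elements all < M is popped entirely
lemma popWhile_all_lt : ∀ (st out : List Int) (M : Int), (∀ x ∈ st, x < M) →
    popWhile st out M = ([], out ++ st) := by
  intro st
  induction st with
  | nil => intro out M _; simp [popWhile]
  | cons t s ih =>
    intro out M h
    simp only [popWhile]
    rw [if_pos (h t (by simp))]
    rw [ih (out ++ [t]) M (fun x hx => h x (by simp [hx]))]
    simp

-- B-side: a bottom element ≥ everything coming is inert (popWhile)
lemma popWhile_bottom : ∀ (st out : List Int) (x M : Int), x ≤ M →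
    popWhile (st ++ [M]) out x = ((popWhile st out x).1 ++ [M], (popWhile st out x).2) := by
  intro st
  induction st with
  | nil => intro out x M hx; simp [popWhile]; omega
  | cons t s ih =>
    intro out x M hx
    simp only [List.cons_append, popWhile]
    split
    · exact ih (out ++ [t]) x M hx
    · simp

-- B-side: a bottom element ≥ everything coming is inert (ssLoop)
lemma ssLoop_bottom : ∀ (l st out : List Int) (M : Int), (∀ x ∈ l, x ≤ M) →
    ssLoop (st ++ [M]) out l = ((ssLoop st out l).1 ++ [M], (ssLoop st out l).2) := by
  intro l
  induction l with
  | nil => intro st out M _; simp [ssLoop]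
  | cons x rest ih =>
    intro st out M h
    simp only [ssLoop]
    rw [popWhile_bottom st out x M (h x (by simp))]
    have : x :: ((popWhile st out x).1 ++ [M]) = (x :: (popWhile st out x).1) ++ [M] := by simp
    rw [this, ih _ _ M (fun y hy => h y (by simp [hy]))]

-- B-side: stack elements come from the initial stack or the input
lemma popWhile_stack_sub : ∀ (st out : List Int) (x : Int) (y : Int),
    y ∈ (popWhile st out x).1 → y ∈ st := by
  intro st
  induction st with
  | nil => intro out x y h; simp [popWhile] at h
  | cons t s ih =>
    intro out x y h
    simp only [popWhile] at h
    split at h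
    · exact List.mem_cons_of_mem t (ih _ x y h)
    · exact h

lemma ssLoop_stack_sub : ∀ (l st out : List Int) (y : Int),
    y ∈ (ssLoop st out l).1 → y ∈ st ∨ y ∈ l := by
  intro l
  induction l with
  | nil => intro st out y h; simp [ssLoop] at h; exact Or.inl h
  | cons x rest ih =>
    intro st out y h
    simp only [ssLoop] at h
    rcases ih _ _ y h with h' | h'
    · rcases List.mem_cons.mp h' with h'' | h''
      · exact Or.inr (by simp [h''])
      · exact Or.inl (popWhile_stack_sub st out x y h'')
    · exact Or.inr (by simp [h'])

lemma ssLoop_append : ∀ (l1 l2 st out : List Int),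
    ssLoop st out (l1 ++ l2) = ssLoop (ssLoop st out l1).1 (ssLoop st out l1).2 l2 := by
  intro l1
  induction l1 with
  | nil => intro l2 st out; simp [ssLoop]
  | cons x rest ih =>
    intro l2 st out
    simp only [List.cons_append, ssLoop]
    exact ih l2 _ _

-- how B reduces at the first maximum
lemma alt_split (u : List Int) (M : Int) (v : List Int)
    (hu : ∀ x ∈ u, x < M) (hv : ∀ x ∈ v, x ≤ M) :
    stack_sort_alt (u ++ M :: v) = stack_sort_alt u ++ stack_sort_alt v ++ [M] := by
  simp only [stack_sort_alt]
  rw [show u ++ M :: v = u ++ [M] ++ v by simp, ssLoop_append, ssLoop_append]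
  have hstu : ∀ y ∈ (ssLoop [] [] u).1, y < M := by
    intro y hy
    rcases ssLoop_stack_sub u [] [] y hy with h | h
    · simp at h
    · exact hu y h
  have hM : ssLoop (ssLoop [] [] u).1 (ssLoop [] [] u).2 [M] =
      ([M], (ssLoop [] [] u).2 ++ (ssLoop [] [] u).1) := by
    simp only [ssLoop]
    rw [popWhile_all_lt _ _ M hstu]
  rw [hM]
  rw [show ([M] : List Int) = [] ++ [M] by simp, ssLoop_bottom v [] _ M hv]
  rw [ssLoop_out v []]
  simp

lemma exists_first_max : ∀ (a : Int) (w : List Int), ∃ u M v,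
    a :: w = u ++ M :: v ∧ (∀ x ∈ u, x < M) ∧ (∀ x ∈ v, x ≤ M) := by
  intro a w
  induction w generalizing a with
  | nil => exact ⟨[], a, [], by simp, by simp, by simp⟩
  | cons b w' ih =>
    obtain ⟨u, M, v, heq, hu, hv⟩ := ih b
    by_cases h : a < M
    · exact ⟨a :: u, M, v, by simp [heq], by
        intro x hx; rcases List.mem_cons.mp hx with h' | h'
        · omega
        · exact hu x h', hv⟩
    · refine ⟨[], a, b :: w', by simp, by simp, ?_⟩
      intro x hx
      have : x ∈ u ++ M :: v := heq ▸ hx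
      rcases List.mem_append.mp this with h' | h'
      · have := hu x h'; omega
      · rcases List.mem_cons.mp h' with h' | h'
        · omega
        · have := hv x h'; omega

lemma alt_nil : stack_sort_alt [] = [] := by simp [stack_sort_alt, ssLoop]

lemma main_equiv : ∀ (w : List Int), stack_sort w = stack_sort_alt w := by
  have key : ∀ (n : Nat) (w : List Int), w.length ≤ n → stack_sort w = stack_sort_alt w := by
    intro n
    induction n with
    | zero =>
      intro w hw
      have : w = [] := List.eq_nil_of_length_eq_zero (by omega)
      rw [this, stack_sort_nil, alt_nil]
    | succ n ih =>
      intro w hw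
      cases w with
      | nil => rw [stack_sort_nil, alt_nil]
      | cons a w' =>
        obtain ⟨u, M, v, heq, hu, hv⟩ := exists_first_max a w'
        have hlen : u.length + v.length + 1 = (a :: w').length := by
          rw [heq]; simp; omega
        rw [heq, stack_sort_split u M v hu hv, alt_split u M v hu hv]
        rw [ih u (by simp at hw hlen ⊢; omega), ih v (by simp at hw hlen ⊢; omega)]
  intro w
  exact key w.length w le_rfl

-- ===== VERDICT (by name: the statement is the Claim_ definition above) =====
theorem stack_sort_spec : Claim_equal_stack_sort := by
  intro w _
  unfold Spec_stack_sort
  exact main_equiv w
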